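-- pv_equiv track=rewrite | github.com/qwerasdzx-123/crypto_gui | misc_encoding.py | brainfuck_encode
-- ===== SOURCE A (Python) =====
-- def brainfuck_encode(text: str) -> str:
--     result = []
--     current = 0
--
--     for char in text:
--         target = ord(char)
--         diff = target - current
--
--         if diff > 0:
--             result.append('+' * diff)
--         elif diff < 0:
--             result.append('-' * abs(diff))
--
--         result.append('.')
--         current = target
--
--     return ''.join(result)
-- ===== SOURCE B (Python) =====
-- def brainfuck_encode(text: str) -> str:
--     # Divide and conquer: encode each half independently; the right half's
--     # starting cell value is the code of the character just before it.
--     def seg(prev: int, cur: int) -> str: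
--         d = cur - prev
--         return ('+' * d if d >= 0 else '-' * -d) + '.'
--
--     def go(prev: int, lo: int, hi: int) -> str:
--         if hi - lo == 0:
--             return ''
--         if hi - lo == 1:
--             return seg(prev, ord(text[lo]))
--         mid = (lo + hi) // 2
--         return go(prev, lo, mid) + go(ord(text[mid - 1]), mid, hi)
--
--     return go(0, 0, len(text))
-- ===== Notes on version B (the rewrite author's own statement) =====
-- stated objective: alternative
-- what changed: Replaces A's single left-to-right loop with a mutable result list and running `current` cell by a divide-and-conquer recursion that splits the text in half, encodes each half independently (the right half seeded with the code of the character preceding it) and concatenates the two programs.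
import Mathlib
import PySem

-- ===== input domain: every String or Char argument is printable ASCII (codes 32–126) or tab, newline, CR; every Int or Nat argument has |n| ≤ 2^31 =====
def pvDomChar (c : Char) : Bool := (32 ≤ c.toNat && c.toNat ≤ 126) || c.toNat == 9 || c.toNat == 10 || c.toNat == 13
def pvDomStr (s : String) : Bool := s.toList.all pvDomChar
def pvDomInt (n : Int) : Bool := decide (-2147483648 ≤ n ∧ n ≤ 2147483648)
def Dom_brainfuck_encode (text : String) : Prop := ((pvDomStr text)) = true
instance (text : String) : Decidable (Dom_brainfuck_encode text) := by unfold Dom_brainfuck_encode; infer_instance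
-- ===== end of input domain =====

-- B encodes by divide and conquer (split in half, encode halves, concatenate)
-- instead of A's single loop with a running cell value (alternative; same result).

-- ===== PORT A =====
-- one loop iteration: append the '+'/'-' run (if any) and '.', update current
def bfStep (acc : List String × Int) (char : Char) : List String × Int :=
  let target : Int := char.toNat
  let diff := target - acc.2
  let r1 :=
    if diff > 0 then acc.1 ++ [String.mk (List.replicate diff.toNat '+')]
    else if diff < 0 then acc.1 ++ [String.mk (List.replicate diff.natAbs '-')]
    else acc.1
  (r1 ++ ["."], target)

def brainfuck_encode (text : String) : String :=
  String.join ((text.toList.foldl bfStep ([], 0)).1)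

-- ===== PORT B =====
-- seg(prev, cur): the '+'/'-' run followed by '.'
def bfSeg (prev cur : Int) : String :=
  let d := cur - prev
  (if d ≥ 0 then String.mk (List.replicate d.toNat '+')
   else String.mk (List.replicate (-d).toNat '-')) ++ "."

-- go(prev, lo, hi) over text, represented as recursion on the sublist l = text[lo:hi]
def bfGo (prev : Int) : List Char → String
  | [] => ""
  | [c] => bfSeg prev (c.toNat : Int)
  | c1 :: c2 :: rest =>
      let l := c1 :: c2 :: rest
      let mid := l.length / 2
      bfGo prev (l.take mid) ++ bfGo ((l[mid - 1]!).toNat : Int) (l.drop mid)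
  termination_by l => l.length
  decreasing_by
    · simp [List.length_take]; omega
    · simp; omega

def brainfuck_encode_alt (text : String) : String :=
  bfGo 0 text.toList

-- ===== PRECONDITION & SPEC =====
def Spec_brainfuck_encode (text : String) (out : String) : Prop := out = brainfuck_encode_alt text
instance (text : String) (out : String) : Decidable (Spec_brainfuck_encode text out) := by unfold Spec_brainfuck_encode; infer_instance

-- ===== CLAIM (what is proved, stated in full; the proofs are below) =====
def Claim_equal_brainfuck_encode : Prop := ∀ (text : String), Dom_brainfuck_encode text → Spec_brainfuck_encode text (brainfuck_encode text)

-- ===== LEMMAS AND PROOFS =====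

-- linear reference recursion: the common value both sides are shown equal to
def bfLin (prev : Int) : List Char → String
  | [] => ""
  | c :: rest => bfSeg prev (c.toNat : Int) ++ bfLin (c.toNat : Int) rest

theorem bf_foldl_join (l : List String) : ∀ (s : String), l.foldl (· ++ ·) s = s ++ String.join l := by
  induction l with
  | nil => intro s; simp [String.join]
  | cons x xs ih =>
      intro s
      simp only [List.foldl, String.join]
      rw [ih (s ++ x), ih ("" ++ x)]
      simp [String.append_assoc]

theorem bf_join_append (a b : List String) : String.join (a ++ b) = String.join a ++ String.join b := by
  simp only [String.join, List.foldl_append]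
  rw [bf_foldl_join b]
  rfl

-- A's fold equals the linear recursion
theorem bf_aux (l : List Char) : ∀ (acc : List String) (c : Int),
    String.join ((l.foldl bfStep (acc, c)).1) = String.join acc ++ bfLin c l := by
  induction l with
  | nil => intro acc c; simp [String.join, bfLin]
  | cons x xs ih =>
      intro acc c
      simp only [List.foldl, bfLin]
      rw [show xs.foldl bfStep (bfStep (acc, c) x) = xs.foldl bfStep ((bfStep (acc, c) x).1, (bfStep (acc, c) x).2) from rfl]
      rw [ih]
      have hstep2 : (bfStep (acc, c) x).2 = (x.toNat : Int) := rfl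
      rw [hstep2]
      have hhead : String.join ((bfStep (acc, c) x).1)
          = String.join acc ++ bfSeg c (x.toNat : Int) := by
        by_cases h1 : ((x.toNat : Int) - c) > 0
        · simp only [bfStep, bfSeg, h1, if_pos, if_pos (le_of_lt h1)]
          rw [bf_join_append, bf_join_append]
          simp [String.join, String.append_assoc]
        · by_cases h2 : ((x.toNat : Int) - c) < 0
          · simp only [bfStep, bfSeg, if_neg h1, if_pos h2, if_neg (not_le.mpr h2)]
            rw [bf_join_append, bf_join_append]
            rw [show ((x.toNat : Int) - c).natAbs = (-((x.toNat : Int) - c)).toNat from by omega]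
            simp [String.join, String.append_assoc]
          · have h0 : ((x.toNat : Int) - c) = 0 := by omega
            simp only [bfStep, bfSeg, h0]
            rw [bf_join_append]
            simp [String.join]
            rfl
      rw [hhead]
      simp [String.append_assoc]

-- the linear recursion splits over append given the last char of the left part
theorem bfLin_append (l1 : List Char) : ∀ (l2 : List Char) (prev : Int) (c : Char),
    l1.getLast? = some c →
    bfLin prev (l1 ++ l2) = bfLin prev l1 ++ bfLin (c.toNat : Int) l2 := by
  induction l1 with
  | nil => intro l2 prev c h; simp at h
  | cons x xs ih =>
      intro l2 prev c h
      cases xs with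
      | nil =>
          simp [List.getLast?] at h
          subst h
          simp [bfLin]
      | cons y ys =>
          have h' : (y :: ys).getLast? = some c := by
            simpa [List.getLast?_cons_cons] using h
          have e1 : bfLin prev (x :: (y :: (ys ++ l2))) = bfSeg prev (x.toNat : Int) ++ bfLin (x.toNat : Int) (y :: (ys ++ l2)) := rfl
          have e2 : bfLin prev (x :: y :: ys) = bfSeg prev (x.toNat : Int) ++ bfLin (x.toNat : Int) (y :: ys) := rfl
          simp only [List.cons_append]
          have ih' := ih l2 (x.toNat : Int) c h'
          simp only [List.cons_append] at ih'
          rw [e1, ih', e2]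
          simp [String.append_assoc]

-- B's divide and conquer equals the linear recursion
theorem bfGo_eq_lin (l : List Char) : ∀ (prev : Int), bfGo prev l = bfLin prev l := by
  induction hn : l.length using Nat.strong_induction_on generalizing l with
  | _ n ih =>
    intro prev
    match l with
    | [] => simp [bfGo, bfLin]
    | [c] => simp [bfGo, bfLin]
    | c1 :: c2 :: rest =>
        rw [bfGo]
        have hlen : (c1 :: c2 :: rest).length = n := hn
        set L := c1 :: c2 :: rest with hL
        have hlen2 : 2 ≤ L.length := by simp [hL]
        have hmid1 : 1 ≤ L.length / 2 := by omega
        have hmidlt : L.length / 2 < L.length := by omega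
        have htake : (L.take (L.length / 2)).length = L.length / 2 := by
          simp [List.length_take]; omega
        have hdrop : (L.drop (L.length / 2)).length = L.length - L.length / 2 := by simp
        rw [ih _ (by omega : (L.take (L.length / 2)).length < n) _ rfl]
        rw [ih _ (by rw [hdrop]; omega : (L.drop (L.length / 2)).length < n) _ rfl]
        have hget : L[L.length / 2 - 1]! = L[L.length / 2 - 1]'(by omega) := by
          simp [List.getElem?_eq_getElem (show L.length / 2 - 1 < L.length by omega)]
        have hlast : (L.take (L.length / 2)).getLast? = some (L[L.length / 2 - 1]'(by omega)) := by
          rw [List.getLast?_eq_getElem?]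
          rw [htake]
          rw [List.getElem?_take, if_pos (by omega)]
          rw [List.getElem?_eq_getElem (by omega : L.length / 2 - 1 < L.length)]
        rw [hget]
        rw [← bfLin_append _ _ _ _ hlast]
        rw [List.take_append_drop]

-- ===== VERDICT (by name: the statement is the Claim_ definition above) =====
theorem brainfuck_encode_spec : Claim_equal_brainfuck_encode := by
  intro text _
  unfold Spec_brainfuck_encode brainfuck_encode brainfuck_encode_alt
  rw [bf_aux, bfGo_eq_lin]
  simp [String.join]
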